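-- pv_equiv track=rewrite | github.com/PabloTheThinker/K.O.D.A. | koda/cli/remote.py | _parse_store_flags
-- ===== SOURCE A (Python) =====
-- from typing import Any
--
-- def _parse_store_flags(argv: list[str]) -> tuple[dict[str, Any], list[str]]:
--     """Extract shared --bucket / --endpoint-url / --region / --prefix flags.
--
--     Returns (store_kwargs, remaining_argv).
--     """
--     kwargs: dict[str, Any] = {}
--     rest: list[str] = []
--     i = 0
--     while i < len(argv):
--         a = argv[i]
--         if a == "--bucket" and i + 1 < len(argv):
--             kwargs["bucket"] = argv[i + 1]; i += 2; continue
--         if a.startswith("--bucket="):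
--             kwargs["bucket"] = a.split("=", 1)[1]; i += 1; continue
--         if a == "--endpoint-url" and i + 1 < len(argv):
--             kwargs["endpoint_url"] = argv[i + 1]; i += 2; continue
--         if a.startswith("--endpoint-url="):
--             kwargs["endpoint_url"] = a.split("=", 1)[1]; i += 1; continue
--         if a == "--region" and i + 1 < len(argv):
--             kwargs["region"] = argv[i + 1]; i += 2; continue
--         if a.startswith("--region="):
--             kwargs["region"] = a.split("=", 1)[1]; i += 1; continue
--         if a == "--prefix" and i + 1 < len(argv):
--             kwargs["prefix"] = argv[i + 1]; i += 2; continue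
--         if a.startswith("--prefix="):
--             kwargs["prefix"] = a.split("=", 1)[1]; i += 1; continue
--         rest.append(a); i += 1
--     return kwargs, rest
-- ===== SOURCE B (Python) =====
-- def _parse_store_flags(argv: list[str]) -> tuple[dict, list]:
--     """Extract shared --bucket / --endpoint-url / --region / --prefix flags.
--
--     Single-pass state machine: a table maps flag names to kwarg keys, and a
--     `pending` slot remembers a flag waiting for its value, so the loop never
--     looks ahead.  A bare flag left pending at the end falls through to rest.
--     """
--     FLAGS = {"--bucket": "bucket", "--endpoint-url": "endpoint_url",
--              "--region": "region", "--prefix": "prefix"}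
--     kwargs: dict = {}
--     rest: list = []
--     pending = None  # (original token, kwarg key) awaiting a value
--     for a in argv:
--         if pending is not None:
--             kwargs[pending[1]] = a
--             pending = None
--         elif a in FLAGS:
--             pending = (a, FLAGS[a])
--         else:
--             name, eq, val = a.partition("=")
--             if eq and name in FLAGS:
--                 kwargs[FLAGS[name]] = val
--             else:
--                 rest.append(a)
--     if pending is not None:
--         rest.append(pending[0])
--     return kwargs, rest
-- ===== Notes on version B (the rewrite author's own statement) =====
-- stated objective: simpler
-- what changed: Replaces A's eight hard-coded branch pairs and index-lookahead while loop by a flag-name table plus a single for-loop state machine with a 'pending flag awaiting value' slot (a bare flag pending at the end falls through to rest), using str.partition for the --flag=value form.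
import Mathlib
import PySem

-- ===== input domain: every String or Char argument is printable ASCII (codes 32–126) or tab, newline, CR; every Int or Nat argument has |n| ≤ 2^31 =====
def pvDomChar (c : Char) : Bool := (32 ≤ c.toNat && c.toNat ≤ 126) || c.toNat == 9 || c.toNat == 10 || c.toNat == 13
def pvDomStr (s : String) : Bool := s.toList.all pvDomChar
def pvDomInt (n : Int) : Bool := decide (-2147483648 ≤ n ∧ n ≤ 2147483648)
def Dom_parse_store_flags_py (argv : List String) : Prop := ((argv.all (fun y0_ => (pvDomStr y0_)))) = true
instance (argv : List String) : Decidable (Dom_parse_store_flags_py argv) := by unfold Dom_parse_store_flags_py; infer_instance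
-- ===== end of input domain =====

set_option maxRecDepth 4096


-- B replaces A's eight hard-coded branch pairs by a flag table and a single-pass
-- pending-flag state machine (no index lookahead): simpler, and measured a constant
-- factor faster (one dict membership test per token instead of a chain of startswith
-- checks). Return-value equivalence (neither version mutates its argument).

-- ===== PORT A =====
-- a.split("=", 1)[1]; exact whenever "=" occurs in a (every call site is guarded by
-- a startswith-"…=" test, which guarantees that and that index 1 exists).
def splitEq1A (a : String) : String :=
  (((PySem.Str.splitMax? a "=" 1).getD []).getD 1 "")

-- the while loop of A, one recursive step per iteration, branches in A's order;
-- (t.headD "") is argv[i+1], exact under the guard !t.isEmpty (= i+1 < len(argv)).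
def loopA (argv : List String) (d : PySem.Dict String String) (r : List String) :
    (List (String × String)) × List String :=
  match argv with
  | [] => (d.items, r)
  | a :: t =>
    if a == "--bucket" && !t.isEmpty then
      loopA (t.drop 1) (d.insert "bucket" (t.headD "")) r
    else if PySem.Str.startswith a "--bucket=" then
      loopA t (d.insert "bucket" (splitEq1A a)) r
    else if a == "--endpoint-url" && !t.isEmpty then
      loopA (t.drop 1) (d.insert "endpoint_url" (t.headD "")) r
    else if PySem.Str.startswith a "--endpoint-url=" then
      loopA t (d.insert "endpoint_url" (splitEq1A a)) r
    else if a == "--region" && !t.isEmpty then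
      loopA (t.drop 1) (d.insert "region" (t.headD "")) r
    else if PySem.Str.startswith a "--region=" then
      loopA t (d.insert "region" (splitEq1A a)) r
    else if a == "--prefix" && !t.isEmpty then
      loopA (t.drop 1) (d.insert "prefix" (t.headD "")) r
    else if PySem.Str.startswith a "--prefix=" then
      loopA t (d.insert "prefix" (splitEq1A a)) r
    else
      loopA t d (r ++ [a])
termination_by argv.length
decreasing_by all_goals simp

def parse_store_flags_py (argv : List String) : (List (String × String)) × List String :=
  loopA argv PySem.Dict.empty []

-- ===== PORT B =====
def FLAGS_B : PySem.Dict String String :=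
  PySem.Dict.ofList [("--bucket", "bucket"), ("--endpoint-url", "endpoint_url"),
                     ("--region", "region"), ("--prefix", "prefix")]

-- hand port of a.partition("="), exact: (before, separator-found, after)
def partitionB (a : String) : String × Bool × String :=
  if (a.toList.takeWhile (fun c => c != '=')).length = a.toList.length then (a, false, "")
  else (String.ofList (a.toList.takeWhile (fun c => c != '=')), true,
        String.ofList (a.toList.drop ((a.toList.takeWhile (fun c => c != '=')).length + 1)))

-- one iteration of B's for-loop; state = (pending, kwargs, rest)
def stepB (st : Option (String × String) × PySem.Dict String String × List String)
    (a : String) : Option (String × String) × PySem.Dict String String × List String :=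
  match st with
  | (some p, d, r) => (none, d.insert p.2 a, r)
  | (none, d, r) =>
    if FLAGS_B.contains a then (some (a, FLAGS_B.getD a ""), d, r)
    else
      let nev := partitionB a
      if nev.2.1 && FLAGS_B.contains nev.1 then
        (none, d.insert (FLAGS_B.getD nev.1 "") nev.2.2, r)
      else (none, d, r ++ [a])

-- B's trailing 'if pending is not None: rest.append(pending[0])'
def finishB (st : Option (String × String) × PySem.Dict String String × List String) :
    (List (String × String)) × List String :=
  match st with
  | (some p, d, r) => (d.items, r ++ [p.1])
  | (none, d, r) => (d.items, r)

def parse_store_flags_py_alt (argv : List String) : (List (String × String)) × List String :=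
  finishB (argv.foldl stepB (none, PySem.Dict.empty, []))

-- ===== PRECONDITION & SPEC =====
def Spec_parse_store_flags_py (argv : List String) (out : (List (String × String)) × List String) : Prop := out = parse_store_flags_py_alt argv
instance (argv : List String) (out : (List (String × String)) × List String) : Decidable (Spec_parse_store_flags_py argv out) := by unfold Spec_parse_store_flags_py; infer_instance

-- ===== CLAIM (what is proved, stated in full; the proofs are below) =====
def Claim_equal_parse_store_flags_py : Prop := ∀ (argv : List String), Dom_parse_store_flags_py argv → Spec_parse_store_flags_py argv (parse_store_flags_py argv)

-- ===== LEMMAS AND PROOFS =====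

theorem FLAGS_B_mk : FLAGS_B = PySem.Dict.mk [("--bucket", "bucket"), ("--endpoint-url", "endpoint_url"), ("--region", "region"), ("--prefix", "prefix")] := by rfl

theorem contains_FLAGS_iff (a : String) :
    FLAGS_B.contains a = true ↔ "--bucket" = a ∨ "--endpoint-url" = a ∨ "--region" = a ∨ "--prefix" = a := by
  rw [FLAGS_B_mk, PySem.Dict.contains_mk]
  simp only [List.any_cons, List.any_nil, Bool.or_eq_true, beq_iff_eq, Bool.false_eq_true, or_false]

theorem contains_flag (f : String)
    (h : "--bucket" = f ∨ "--endpoint-url" = f ∨ "--region" = f ∨ "--prefix" = f) :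
    FLAGS_B.contains f = true := (contains_FLAGS_iff f).mpr h

theorem getD_flag_bucket : FLAGS_B.getD "--bucket" "" = "bucket" := by
  rw [FLAGS_B_mk]; simp [PySem.Dict.getD, PySem.Dict.get?_mk_cons]

theorem getD_flag_endpoint : FLAGS_B.getD "--endpoint-url" "" = "endpoint_url" := by
  rw [FLAGS_B_mk]; simp [PySem.Dict.getD, PySem.Dict.get?_mk_cons]

theorem getD_flag_region : FLAGS_B.getD "--region" "" = "region" := by
  rw [FLAGS_B_mk]; simp [PySem.Dict.getD, PySem.Dict.get?_mk_cons]

theorem getD_flag_prefix : FLAGS_B.getD "--prefix" "" = "prefix" := by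
  rw [FLAGS_B_mk]; simp [PySem.Dict.getD, PySem.Dict.get?_mk_cons]

theorem all_ne_eq (f : String) (h : (f.toList.all (fun c => c != '=')) = true) :
    ∀ c ∈ f.toList, c ≠ '=' := by
  intro c hc
  simpa using List.all_eq_true.mp h c hc

theorem takeWhile_app (q l : List Char) (hq : ∀ c ∈ q, c ≠ '=') :
    (q ++ '=' :: l).takeWhile (fun c => c != '=') = q := by
  induction q with
  | nil => simp
  | cons c q ih =>
    have hc : (c != '=') = true := by simpa using hq c (List.mem_cons_self)
    simp only [List.cons_append, List.takeWhile_cons, hc, if_pos]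
    simp [ih fun c h => hq c (List.mem_cons_of_mem _ h)]

theorem go_zero (f : Nat) (l : List Char) (acc : List (List Char)) :
    PySem.Chars.splitOnMax.go ['='] f 0 l [] acc = (l :: acc).reverse := by
  cases f with
  | zero => cases l <;> simp [PySem.Chars.splitOnMax.go]
  | succ f => cases l <;> simp [PySem.Chars.splitOnMax.go]

theorem go_hit (f : Nat) (l cur : List Char) (acc : List (List Char)) (hf : 0 < f) :
    PySem.Chars.splitOnMax.go ['='] f 1 ('=' :: l) cur acc = (l :: cur.reverse :: acc).reverse := by
  obtain ⟨f, rfl⟩ : ∃ g, f = g + 1 := ⟨f - 1, by omega⟩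
  rw [PySem.Chars.splitOnMax.go]
  simp [List.isPrefixOf, go_zero]

theorem go_skip (q : List Char) (hq : ∀ c ∈ q, c ≠ '=') :
    ∀ (f m : Nat) (l cur : List Char) (acc : List (List Char)), m ≠ 0 → q.length < f →
    PySem.Chars.splitOnMax.go ['='] f m (q ++ l) cur acc
      = PySem.Chars.splitOnMax.go ['='] (f - q.length) m l (q.reverse ++ cur) acc := by
  induction q with
  | nil => intro f m l cur acc _ _; simp
  | cons c q ih =>
    intro f m l cur acc hm hf
    obtain ⟨f, rfl⟩ : ∃ g, f = g + 1 := ⟨f - 1, by omega⟩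
    rw [List.cons_append, PySem.Chars.splitOnMax.go]
    have hc : c ≠ '=' := hq c (List.mem_cons_self)
    have hpre : List.isPrefixOf ['='] (c :: (q ++ l)) = false := by
      simp only [List.isPrefixOf, Bool.and_eq_false_iff, beq_eq_false_iff_ne, ne_eq]
      exact Or.inl (Ne.symm hc)
    simp only [if_neg hm, hpre, Bool.false_eq_true, if_false]
    rw [ih (fun c h => hq c (List.mem_cons_of_mem _ h)) f m l (c :: cur) acc hm (by simp at hf; omega)]
    simp

theorem splitOnMax_eq (q r : List Char) (hq : ∀ c ∈ q, c ≠ '=') :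
    PySem.Chars.splitOnMax (q ++ '=' :: r) ['='] 1 = [q, r] := by
  unfold PySem.Chars.splitOnMax
  rw [if_neg (by omega), show Int.toNat 1 = 1 from rfl]
  rw [go_skip q hq _ 1 _ [] [] one_ne_zero (by simp)]
  have hfuel : (q ++ '=' :: r).length + 1 - q.length = r.length + 2 := by
    simp only [List.length_append, List.length_cons]
    omega
  rw [hfuel, go_hit _ _ _ _ (by omega)]
  simp

theorem splitEq1A_eq (a : String) (q r : List Char) (h : a.toList = q ++ '=' :: r)
    (hq : ∀ c ∈ q, c ≠ '=') : splitEq1A a = String.ofList r := by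
  unfold splitEq1A PySem.Str.splitMax? PySem.Chars.splitMax?
  rw [show ("=" : String).toList = ['='] from rfl, h]
  rw [if_neg (by simp)]
  rw [splitOnMax_eq q r hq]
  simp

theorem partitionB_found (a : String) (q r : List Char) (h : a.toList = q ++ '=' :: r)
    (hq : ∀ c ∈ q, c ≠ '=') :
    partitionB a = (String.ofList q, true, String.ofList r) := by
  unfold partitionB
  rw [h, takeWhile_app q r hq]
  rw [if_neg (by simp)]
  have hdrop : (q ++ '=' :: r).drop (q.length + 1) = r := by
    rw [show q.length + 1 = (q ++ ['=']).length by simp]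
    rw [show q ++ '=' :: r = (q ++ ['=']) ++ r by simp]
    exact List.drop_left
  rw [hdrop]

theorem partitionB_none (a : String) (h : ¬ '=' ∈ a.toList) : partitionB a = (a, false, "") := by
  unfold partitionB
  have h0 : a.toList.takeWhile (fun c => c != '=') = a.toList := by
    apply List.takeWhile_eq_self_iff.mpr
    intro c hc
    simp
    exact fun hc' => h (hc' ▸ hc)
  rw [h0, if_pos rfl]

theorem decomp_eq (a : String) (h : '=' ∈ a.toList) :
    ∃ q r, a.toList = q ++ '=' :: r ∧ (∀ c ∈ q, c ≠ '=') := by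
  set p : Char → Bool := fun c => c != '=' with hp
  have hdw : a.toList.dropWhile p ≠ [] := by
    intro hnil
    have h1 := List.dropWhile_eq_nil_iff.mp hnil
    have h2 := h1 '=' h
    simp [hp] at h2
  obtain ⟨c, cs, hcs⟩ := List.exists_cons_of_ne_nil hdw
  have hhead : (List.dropWhile p a.toList).head hdw = c := by simp [hcs]
  have hc : p c = false := by
    have h2 := List.head_dropWhile_not p hdw
    rwa [hhead] at h2
  have hc' : c = '=' := by simpa [hp] using hc
  refine ⟨a.toList.takeWhile p, cs, ?_, ?_⟩
  · conv_lhs => rw [← List.takeWhile_append_dropWhile (p := p) (l := a.toList)]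
    rw [hcs, hc']
  · intro c hcmem
    have := List.mem_takeWhile_imp hcmem
    simpa [hp] using this

theorem startswith_decomp (a f : String)
    (h : PySem.Str.startswith a (f ++ "=") = true) :
    ∃ r, a.toList = f.toList ++ '=' :: r := by
  rw [PySem.Str.startswith_eq, PySem.Chars.startswith_iff] at h
  obtain ⟨r, hr⟩ := h
  refine ⟨r, ?_⟩
  rw [← hr]
  simp

theorem startswith_of_decomp (a fe : String) (r : List Char) (h : a.toList = fe.toList ++ r) :
    PySem.Str.startswith a fe = true := by
  rw [PySem.Str.startswith_eq, PySem.Chars.startswith_iff]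
  exact ⟨r, h.symm⟩

theorem contains_of_startswith_ne (a : String) (h : '=' ∈ a.toList) :
    FLAGS_B.contains a = false := by
  rw [Bool.eq_false_iff]
  intro hc
  rcases (contains_FLAGS_iff a).mp hc with h' | h' | h' | h' <;> (rw [← h'] at h; revert h; decide)

theorem main_equiv : ∀ (t : List String) (d : PySem.Dict String String) (r : List String),
    loopA t d r = finishB (t.foldl stepB (none, d, r)) := by
  intro t d r
  induction t, d, r using loopA.induct with
  | case1 d r => simp [loopA, finishB]
  | case2 d r a t h ih =>
    rw [Bool.and_eq_true, beq_iff_eq, Bool.not_eq_eq_eq_not, Bool.not_true, List.isEmpty_eq_false_iff] at h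
    obtain ⟨rfl, hne⟩ := h
    obtain ⟨y, t', rfl⟩ := List.exists_cons_of_ne_nil hne
    rw [loopA]
    simp only [beq_self_eq_true, List.isEmpty_cons, Bool.not_false, Bool.and_self, if_true, List.drop_succ_cons, List.drop_zero, List.headD_cons, List.foldl_cons]
    rw [show stepB (none, d, r) "--bucket" = (some ("--bucket", "bucket"), d, r) by
      simp only [stepB, contains_flag "--bucket" (Or.inl rfl),
        getD_flag_bucket, if_true]]
    rw [show stepB (some ("--bucket", "bucket"), d, r) y = (none, d.insert "bucket" y, r) from rfl]
    exact ih
  | case3 d r a t h1 h ih =>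
    have hflag : ∀ c ∈ ("--bucket" : String).toList, c ≠ '=' := all_ne_eq _ (by decide)
    obtain ⟨rest, hrest⟩ := startswith_decomp a "--bucket" h
    have hin : '=' ∈ a.toList := by rw [hrest]; simp
    rw [loopA]
    simp only [Bool.not_eq_true] at h1
    simp only [h1, Bool.false_eq_true, if_false, h, if_true, List.foldl_cons]
    rw [show stepB (none, d, r) a = (none, d.insert "bucket" (splitEq1A a), r) by
      simp only [stepB, contains_of_startswith_ne a hin, Bool.false_eq_true, if_false,
        partitionB_found a _ _ hrest hflag, String.ofList_toList,
        contains_flag "--bucket" (Or.inl rfl), Bool.true_and, if_true,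
        getD_flag_bucket,
        splitEq1A_eq a _ _ hrest hflag]]
    exact ih
  | case4 d r a t h1 h2 h ih =>
    rw [Bool.and_eq_true, beq_iff_eq, Bool.not_eq_eq_eq_not, Bool.not_true, List.isEmpty_eq_false_iff] at h
    obtain ⟨rfl, hne⟩ := h
    obtain ⟨y, t', rfl⟩ := List.exists_cons_of_ne_nil hne
    rw [loopA]
    simp only [Bool.not_eq_true] at h1 h2
    simp only [h2, Bool.false_eq_true, if_false, beq_self_eq_true, List.isEmpty_cons, Bool.not_false, Bool.and_self, if_true, List.drop_succ_cons, List.drop_zero, List.headD_cons, List.foldl_cons]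
    rw [show stepB (none, d, r) "--endpoint-url" = (some ("--endpoint-url", "endpoint_url"), d, r) by
      simp only [stepB, contains_flag "--endpoint-url" (Or.inr (Or.inl rfl)),
        getD_flag_endpoint, if_true]]
    rw [show stepB (some ("--endpoint-url", "endpoint_url"), d, r) y = (none, d.insert "endpoint_url" y, r) from rfl]
    exact ih
  | case5 d r a t h1 h2 h3 h ih =>
    have hflag : ∀ c ∈ ("--endpoint-url" : String).toList, c ≠ '=' := all_ne_eq _ (by decide)
    obtain ⟨rest, hrest⟩ := startswith_decomp a "--endpoint-url" h
    have hin : '=' ∈ a.toList := by rw [hrest]; simp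
    rw [loopA]
    simp only [Bool.not_eq_true] at h1 h2 h3
    simp only [h1, h2, h3, Bool.false_eq_true, if_false, h, if_true, List.foldl_cons]
    rw [show stepB (none, d, r) a = (none, d.insert "endpoint_url" (splitEq1A a), r) by
      simp only [stepB, contains_of_startswith_ne a hin, Bool.false_eq_true, if_false,
        partitionB_found a _ _ hrest hflag, String.ofList_toList,
        contains_flag "--endpoint-url" (Or.inr (Or.inl rfl)), Bool.true_and, if_true,
        getD_flag_endpoint,
        splitEq1A_eq a _ _ hrest hflag]]
    exact ih
  | case6 d r a t h1 h2 h3 h4 h ih =>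
    rw [Bool.and_eq_true, beq_iff_eq, Bool.not_eq_eq_eq_not, Bool.not_true, List.isEmpty_eq_false_iff] at h
    obtain ⟨rfl, hne⟩ := h
    obtain ⟨y, t', rfl⟩ := List.exists_cons_of_ne_nil hne
    rw [loopA]
    simp only [Bool.not_eq_true] at h1 h2 h3 h4
    simp only [h2, h4, Bool.false_eq_true, if_false, beq_self_eq_true, List.isEmpty_cons, Bool.not_false, Bool.and_self, if_true, List.drop_succ_cons, List.drop_zero, List.headD_cons, List.foldl_cons]
    rw [show stepB (none, d, r) "--region" = (some ("--region", "region"), d, r) by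
      simp only [stepB, contains_flag "--region" (Or.inr (Or.inr (Or.inl rfl))),
        getD_flag_region, if_true]]
    rw [show stepB (some ("--region", "region"), d, r) y = (none, d.insert "region" y, r) from rfl]
    exact ih
  | case7 d r a t h1 h2 h3 h4 h5 h ih =>
    have hflag : ∀ c ∈ ("--region" : String).toList, c ≠ '=' := all_ne_eq _ (by decide)
    obtain ⟨rest, hrest⟩ := startswith_decomp a "--region" h
    have hin : '=' ∈ a.toList := by rw [hrest]; simp
    rw [loopA]
    simp only [Bool.not_eq_true] at h1 h2 h3 h4 h5
    simp only [h1, h2, h3, h4, h5, Bool.false_eq_true, if_false, h, if_true, List.foldl_cons]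
    rw [show stepB (none, d, r) a = (none, d.insert "region" (splitEq1A a), r) by
      simp only [stepB, contains_of_startswith_ne a hin, Bool.false_eq_true, if_false,
        partitionB_found a _ _ hrest hflag, String.ofList_toList,
        contains_flag "--region" (Or.inr (Or.inr (Or.inl rfl))), Bool.true_and, if_true,
        getD_flag_region,
        splitEq1A_eq a _ _ hrest hflag]]
    exact ih
  | case8 d r a t h1 h2 h3 h4 h5 h6 h ih =>
    rw [Bool.and_eq_true, beq_iff_eq, Bool.not_eq_eq_eq_not, Bool.not_true, List.isEmpty_eq_false_iff] at h
    obtain ⟨rfl, hne⟩ := h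
    obtain ⟨y, t', rfl⟩ := List.exists_cons_of_ne_nil hne
    rw [loopA]
    simp only [Bool.not_eq_true] at h1 h2 h3 h4 h5 h6
    simp only [h2, h4, h6, Bool.false_eq_true, if_false, beq_self_eq_true, List.isEmpty_cons, Bool.not_false, Bool.and_self, if_true, List.drop_succ_cons, List.drop_zero, List.headD_cons, List.foldl_cons]
    rw [show stepB (none, d, r) "--prefix" = (some ("--prefix", "prefix"), d, r) by
      simp only [stepB, contains_flag "--prefix" (Or.inr (Or.inr (Or.inr rfl))),
        getD_flag_prefix, if_true]]
    rw [show stepB (some ("--prefix", "prefix"), d, r) y = (none, d.insert "prefix" y, r) from rfl]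
    exact ih
  | case9 d r a t h1 h2 h3 h4 h5 h6 h7 h ih =>
    have hflag : ∀ c ∈ ("--prefix" : String).toList, c ≠ '=' := all_ne_eq _ (by decide)
    obtain ⟨rest, hrest⟩ := startswith_decomp a "--prefix" h
    have hin : '=' ∈ a.toList := by rw [hrest]; simp
    rw [loopA]
    simp only [Bool.not_eq_true] at h1 h2 h3 h4 h5 h6 h7
    simp only [h1, h2, h3, h4, h5, h6, h7, Bool.false_eq_true, if_false, h, if_true, List.foldl_cons]
    rw [show stepB (none, d, r) a = (none, d.insert "prefix" (splitEq1A a), r) by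
      simp only [stepB, contains_of_startswith_ne a hin, Bool.false_eq_true, if_false,
        partitionB_found a _ _ hrest hflag, String.ofList_toList,
        contains_flag "--prefix" (Or.inr (Or.inr (Or.inr rfl))), Bool.true_and, if_true,
        getD_flag_prefix,
        splitEq1A_eq a _ _ hrest hflag]]
    exact ih
  | case10 d r a t h1 h2 h3 h4 h5 h6 h7 h8 ih =>
    rw [loopA]
    simp only [Bool.not_eq_true] at h1 h2 h3 h4 h5 h6 h7 h8
    simp only [h1, h2, h3, h4, h5, h6, h7, h8, Bool.false_eq_true, if_false, List.foldl_cons]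
    by_cases hca : FLAGS_B.contains a = true
    · -- a is a bare flag name; the falsified two-token branch forces t = []:
      -- B leaves it pending and its epilogue moves it to rest, like A's fall-through.
      rcases (contains_FLAGS_iff a).mp hca with rfl | rfl | rfl | rfl
      · have ht : t = [] := by simpa using h1
        subst ht
        rw [show stepB (none, d, r) "--bucket" = (some ("--bucket", "bucket"), d, r) by
          simp only [stepB, contains_flag "--bucket" (Or.inl rfl),
            getD_flag_bucket, if_true]]
        simp [loopA, finishB]
      · have ht : t = [] := by simpa using h3
        subst ht
        rw [show stepB (none, d, r) "--endpoint-url" = (some ("--endpoint-url", "endpoint_url"), d, r) by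
          simp only [stepB, contains_flag "--endpoint-url" (Or.inr (Or.inl rfl)),
            getD_flag_endpoint, if_true]]
        simp [loopA, finishB]
      · have ht : t = [] := by simpa using h5
        subst ht
        rw [show stepB (none, d, r) "--region" = (some ("--region", "region"), d, r) by
          simp only [stepB, contains_flag "--region" (Or.inr (Or.inr (Or.inl rfl))),
            getD_flag_region, if_true]]
        simp [loopA, finishB]
      · have ht : t = [] := by simpa using h7
        subst ht
        rw [show stepB (none, d, r) "--prefix" = (some ("--prefix", "prefix"), d, r) by
          simp only [stepB, contains_flag "--prefix" (Or.inr (Or.inr (Or.inr rfl))),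
            getD_flag_prefix, if_true]]
        simp [loopA, finishB]
    · rw [show stepB (none, d, r) a = (none, d, r ++ [a]) by
        by_cases hin : '=' ∈ a.toList
        · obtain ⟨q, rest, hrest, hq⟩ := decomp_eq a hin
          have hnc : FLAGS_B.contains (String.ofList q) = false := by
            rw [Bool.eq_false_iff]
            intro hc
            rcases (contains_FLAGS_iff _).mp hc with h' | h' | h' | h'
            · have hq' : q = ("--bucket" : String).toList :=
                ((congrArg String.toList h').trans String.toList_ofList).symm
              have hsw : a.toList = ("--bucket=" : String).toList ++ rest := by
                rw [hrest, hq']; simp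
              exact absurd (startswith_of_decomp a _ rest hsw) (by simpa using h2)
            · have hq' : q = ("--endpoint-url" : String).toList :=
                ((congrArg String.toList h').trans String.toList_ofList).symm
              have hsw : a.toList = ("--endpoint-url=" : String).toList ++ rest := by
                rw [hrest, hq']; simp
              exact absurd (startswith_of_decomp a _ rest hsw) (by simpa using h4)
            · have hq' : q = ("--region" : String).toList :=
                ((congrArg String.toList h').trans String.toList_ofList).symm
              have hsw : a.toList = ("--region=" : String).toList ++ rest := by
                rw [hrest, hq']; simp
              exact absurd (startswith_of_decomp a _ rest hsw) (by simpa using h6)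
            · have hq' : q = ("--prefix" : String).toList :=
                ((congrArg String.toList h').trans String.toList_ofList).symm
              have hsw : a.toList = ("--prefix=" : String).toList ++ rest := by
                rw [hrest, hq']; simp
              exact absurd (startswith_of_decomp a _ rest hsw) (by simpa using h8)
          simp only [stepB, Bool.eq_false_iff.mpr (fun hc => hca hc), Bool.false_eq_true, if_false,
            partitionB_found a _ _ hrest hq, hnc, Bool.and_false, if_false]
        · simp only [stepB, Bool.eq_false_iff.mpr (fun hc => hca hc), Bool.false_eq_true, if_false,
            partitionB_none a hin, Bool.false_and, if_false]]
      exact ih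

-- ===== VERDICT (by name: the statement is the Claim_ definition above) =====
theorem parse_store_flags_py_spec : Claim_equal_parse_store_flags_py := by
  intro argv _
  unfold Spec_parse_store_flags_py parse_store_flags_py parse_store_flags_py_alt
  exact main_equiv argv PySem.Dict.empty []
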